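-- pv_equiv track=rewrite | github.com/raytroop/whaleID | bboxGen/datagen.py | bounding_rectangle
-- ===== SOURCE A (Python) =====
-- def bounding_rectangle(coord, length):
--     x0, y0 = coord[0]
--     x1, y1 = coord[0]
--     for x, y in coord[1:]:
--         x0 = min(x, x0)
--         y0 = min(y, y0)
--         x1 = max(x, x1)
--         y1 = max(y, y1)
--     return max(x0, 0), max(y0, 0), min(x1, length), min(y1, length)
-- ===== SOURCE B (Python) =====
-- def bounding_rectangle(coord, length):
--     bx = sorted(p[0] for p in coord)
--     by = sorted(p[1] for p in coord)
--     return max(bx[0], 0), max(by[0], 0), min(bx[-1], length), min(by[-1], length)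
-- ===== Notes on version B (the rewrite author's own statement) =====
-- stated objective: alternative
-- what changed: B sorts each coordinate column and reads the extremes off the ends of the sorted lists instead of A's single four-accumulator min/max scan; it trades A's O(n) scan for an O(n log n) sort-then-index formulation.
import Mathlib
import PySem

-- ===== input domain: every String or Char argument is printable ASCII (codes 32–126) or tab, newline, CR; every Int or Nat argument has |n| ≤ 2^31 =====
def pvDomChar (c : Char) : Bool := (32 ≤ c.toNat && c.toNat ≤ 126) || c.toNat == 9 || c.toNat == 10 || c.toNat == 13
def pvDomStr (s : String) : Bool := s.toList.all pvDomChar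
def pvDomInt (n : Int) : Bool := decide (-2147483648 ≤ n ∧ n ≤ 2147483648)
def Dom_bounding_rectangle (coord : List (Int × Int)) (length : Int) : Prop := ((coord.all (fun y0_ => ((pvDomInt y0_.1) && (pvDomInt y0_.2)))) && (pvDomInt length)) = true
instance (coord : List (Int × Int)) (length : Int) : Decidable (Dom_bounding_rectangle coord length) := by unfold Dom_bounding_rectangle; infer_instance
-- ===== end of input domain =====

-- B replaces A's four-accumulator scan by sorting each coordinate column and reading the
-- extremes off the ends of the sorted lists (alternative decomposition, not faster).

-- ===== PORT A =====
-- A: one scan keeping four running accumulators, seeded with coord[0].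
-- coord = [] raises IndexError in Python; that case is excluded by Pre_ (empty branch returns a dummy).
def bounding_rectangle (coord : List (Int × Int)) (length : Int) : Int × Int × Int × Int :=
  match coord with
  | [] => (0, 0, 0, 0)
  | (x0, y0) :: rest =>
    let s := rest.foldl
      (fun (s : Int × Int × Int × Int) (p : Int × Int) =>
        (min p.1 s.1, min p.2 s.2.1, max p.1 s.2.2.1, max p.2 s.2.2.2))
      (x0, y0, x0, y0)
    (max s.1 0, max s.2.1 0, min s.2.2.1 length, min s.2.2.2 length)

-- ===== PORT B =====
-- B: sort each coordinate column, take bx[0]/bx[-1] (min/max by sortedness) and clamp.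
-- bx[0] on an empty list raises IndexError in Python (excluded by Pre_); .getD 0 is that dummy.
def bounding_rectangle_alt (coord : List (Int × Int)) (length : Int) : Int × Int × Int × Int :=
  let bx := PySem.List.sorted (coord.map Prod.fst) (fun v => v)
  let by_ := PySem.List.sorted (coord.map Prod.snd) (fun v => v)
  (max ((PySem.List.pyGet? bx 0).getD 0) 0,
   max ((PySem.List.pyGet? by_ 0).getD 0) 0,
   min ((PySem.List.pyGet? bx (-1)).getD 0) length,
   min ((PySem.List.pyGet? by_ (-1)).getD 0) length)

-- ===== PRECONDITION & SPEC =====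
-- Pre_ excludes only coord = [], on which Python A raises IndexError (coord[0]).
def Pre_bounding_rectangle (coord : List (Int × Int)) (length : Int) : Prop := coord ≠ []
instance (coord : List (Int × Int)) (length : Int) : Decidable (Pre_bounding_rectangle coord length) := by unfold Pre_bounding_rectangle; infer_instance
def pvWitness_bounding_rectangle : (List (Int × Int)) × Int := ([(1, 2), (5, -3)], 4)
def Spec_bounding_rectangle (coord : List (Int × Int)) (length : Int) (out : Int × Int × Int × Int) : Prop := out = bounding_rectangle_alt coord length
instance (coord : List (Int × Int)) (length : Int) (out : Int × Int × Int × Int) : Decidable (Spec_bounding_rectangle coord length out) := by unfold Spec_bounding_rectangle; infer_instance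

-- ===== CLAIM =====
def Claim_equal_bounding_rectangle : Prop := ∀ (coord : List (Int × Int)) (length : Int), Dom_bounding_rectangle coord length → Pre_bounding_rectangle coord length → Spec_bounding_rectangle coord length (bounding_rectangle coord length)

-- ===== LEMMAS AND PROOFS =====

-- A's four-accumulator fold is the four componentwise min/max folds.
theorem fold4_eq (l : List (Int × Int)) (a b c d : Int) :
    l.foldl
      (fun (s : Int × Int × Int × Int) (p : Int × Int) =>
        (min p.1 s.1, min p.2 s.2.1, max p.1 s.2.2.1, max p.2 s.2.2.2))
      (a, b, c, d)
    = ((l.map Prod.fst).foldl min a, (l.map Prod.snd).foldl min b,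
       (l.map Prod.fst).foldl max c, (l.map Prod.snd).foldl max d) := by
  induction l generalizing a b c d with
  | nil => simp
  | cons p t ih =>
    simp only [List.foldl_cons, List.map_cons, ih]
    rw [min_comm p.1 a, min_comm p.2 b, max_comm p.1 c, max_comm p.2 d]

theorem foldl_min_mem (t : List Int) (a : Int) : t.foldl min a ∈ a :: t := by
  induction t generalizing a with
  | nil => simp
  | cons b t ih =>
    have h := ih (min a b)
    rcases List.mem_cons.mp h with h | h
    · rcases min_choice a b with hm | hm <;> rw [List.foldl_cons, h, hm] <;> simp
    · simp [List.foldl_cons, List.mem_cons.mpr (Or.inr (List.mem_cons.mpr (Or.inr h)))]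

theorem foldl_min_le (t : List Int) (a : Int) : ∀ x ∈ a :: t, t.foldl min a ≤ x := by
  induction t generalizing a with
  | nil => intro x hx; simp at hx; simp [hx]
  | cons b t ih =>
    intro x hx
    rcases List.mem_cons.mp hx with h | h
    · rw [h]
      exact le_trans (ih (min a b) (min a b) (List.mem_cons_self)) (min_le_left a b)
    · rcases List.mem_cons.mp h with h | h
      · rw [h]
        exact le_trans (ih (min a b) (min a b) (List.mem_cons_self)) (min_le_right a b)
      · exact ih (min a b) x (List.mem_cons.mpr (Or.inr h))

theorem foldl_max_mem (t : List Int) (a : Int) : t.foldl max a ∈ a :: t := by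
  induction t generalizing a with
  | nil => simp
  | cons b t ih =>
    have h := ih (max a b)
    rcases List.mem_cons.mp h with h | h
    · rcases max_choice a b with hm | hm <;> rw [List.foldl_cons, h, hm] <;> simp
    · simp [List.foldl_cons, List.mem_cons.mpr (Or.inr (List.mem_cons.mpr (Or.inr h)))]

theorem le_foldl_max (t : List Int) (a : Int) : ∀ x ∈ a :: t, x ≤ t.foldl max a := by
  induction t generalizing a with
  | nil => intro x hx; simp at hx; simp [hx]
  | cons b t ih =>
    intro x hx
    rcases List.mem_cons.mp hx with h | h
    · rw [h]
      exact le_trans (le_max_left a b) (ih (max a b) (max a b) (List.mem_cons_self))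
    · rcases List.mem_cons.mp h with h | h
      · rw [h]
        exact le_trans (le_max_right a b) (ih (max a b) (max a b) (List.mem_cons_self))
      · exact ih (max a b) x (List.mem_cons.mpr (Or.inr h))

theorem le_getLast_of_pairwise (s : List Int) (hp : s.Pairwise (· ≤ ·)) (h : s ≠ []) :
    ∀ x ∈ s, x ≤ s.getLast h := by
  induction s with
  | nil => exact absurd rfl h
  | cons m t ih =>
    intro x hx
    cases t with
    | nil => simp at hx; simp [hx, List.getLast]
    | cons b u =>
      rw [List.getLast_cons (by simp)]
      rcases List.mem_cons.mp hx with h1 | h1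
      · subst h1
        have hm : x ≤ b := (List.pairwise_cons.mp hp).1 b (List.mem_cons_self)
        have := ih (List.pairwise_cons.mp hp).2 (by simp) b (List.mem_cons_self)
        exact le_trans hm this
      · exact ih (List.pairwise_cons.mp hp).2 (by simp) x h1

-- head of sorted(a::t) is the running min of A's scan
theorem sorted_head_min (a : Int) (t : List Int) :
    ((PySem.List.pyGet? (PySem.List.sorted (a :: t) (fun v => v)) 0).getD 0) = t.foldl min a := by
  rcases hs : PySem.List.sorted (a :: t) (fun v => v) with _ | ⟨m, t'⟩
  · exact absurd ((PySem.List.sorted_eq_nil_iff _ _ _).mp hs) (by simp)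
  · rw [PySem.List.pyGet?_zero_cons, Option.getD_some]
    have hmem : m ∈ a :: t := (PySem.List.mem_sorted _ _ _ _).mp (hs ▸ List.mem_cons_self)
    have hle : ∀ y ∈ a :: t, m ≤ y := by
      intro y hy
      simpa using PySem.List.key_head_sorted_le (xs := a :: t) (key := fun v => v) hs y hy
    exact le_antisymm (hle _ (foldl_min_mem t a)) (foldl_min_le t a m hmem)

-- last element of sorted(a::t) is the running max of A's scan
theorem sorted_last_max (a : Int) (t : List Int) :
    ((PySem.List.pyGet? (PySem.List.sorted (a :: t) (fun v => v)) (-1)).getD 0) = t.foldl max a := by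
  have hne : PySem.List.sorted (a :: t) (fun v => v) ≠ [] := by
    intro h; exact absurd ((PySem.List.sorted_eq_nil_iff _ _ _).mp h) (by simp)
  rw [PySem.List.pyGet?_neg_one, List.getLast?_eq_some_getLast hne, Option.getD_some]
  have hp : (PySem.List.sorted (a :: t) (fun v => v)).Pairwise (· ≤ ·) := by
    simpa using PySem.List.sorted_pairwise (xs := a :: t) (key := fun v => v)
  have hg : (PySem.List.sorted (a :: t) (fun v => v)).getLast hne ∈ a :: t :=
    (PySem.List.mem_sorted _ _ _ _).mp (List.getLast_mem hne)
  have hfold : t.foldl max a ∈ PySem.List.sorted (a :: t) (fun v => v) :=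
    (PySem.List.mem_sorted _ _ _ _).mpr (foldl_max_mem t a)
  exact le_antisymm
    (le_foldl_max t a _ hg)
    (le_getLast_of_pairwise _ hp hne _ hfold)

-- ===== VERDICT =====
theorem bounding_rectangle_spec : Claim_equal_bounding_rectangle := by
  intro coord length _ hpre
  cases coord with
  | nil => exact absurd rfl hpre
  | cons p rest =>
    obtain ⟨x0, y0⟩ := p
    unfold Spec_bounding_rectangle bounding_rectangle bounding_rectangle_alt
    simp only [List.map_cons, fold4_eq, sorted_head_min, sorted_last_max]
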